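-- pv_equiv track=rewrite | github.com/AbdallahSalah003/PyLearn | 7-markdown-to-html/app.py | convert_lists
-- ===== SOURCE A (Python) =====
-- def convert_lists(lines):
--     in_list = False
--     html_lines = []
--     for line in lines:
--         if line.startswith('- '):
--             if not in_list:
--                 in_list = True
--                 html_lines.append('<ul>')
--             html_lines.append(f'<li>{line[2:]}</li>')
--         else:
--             if in_list:
--                 in_list = False
--                 html_lines.append('</ul>')
--             html_lines.append(line)
--     if in_list:
--         html_lines.append('</ul>')
--     return html_lines
-- ===== SOURCE B (Python) =====
-- def convert_lists(lines):
--     # Run-based: process maximal runs of '- ' lines at once; no in_list flag.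
--     html = []
--     i = 0
--     n = len(lines)
--     while i < n:
--         if lines[i].startswith('- '):
--             j = i
--             while j < n and lines[j].startswith('- '):
--                 j += 1
--             html.append('<ul>')
--             html.extend(f'<li>{l[2:]}</li>' for l in lines[i:j])
--             html.append('</ul>')
--             i = j
--         else:
--             html.append(lines[i])
--             i += 1
--     return html
-- ===== Notes on version B (the rewrite author's own statement) =====
-- stated objective: alternative
-- what changed: B replaces A's line-by-line state machine with an in_list flag by a run-based pass: it scans each maximal run of '- ' lines at once and emits <ul>, the items, </ul> per run, so no flag or trailing-close fixup exists.
import Mathlib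
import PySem

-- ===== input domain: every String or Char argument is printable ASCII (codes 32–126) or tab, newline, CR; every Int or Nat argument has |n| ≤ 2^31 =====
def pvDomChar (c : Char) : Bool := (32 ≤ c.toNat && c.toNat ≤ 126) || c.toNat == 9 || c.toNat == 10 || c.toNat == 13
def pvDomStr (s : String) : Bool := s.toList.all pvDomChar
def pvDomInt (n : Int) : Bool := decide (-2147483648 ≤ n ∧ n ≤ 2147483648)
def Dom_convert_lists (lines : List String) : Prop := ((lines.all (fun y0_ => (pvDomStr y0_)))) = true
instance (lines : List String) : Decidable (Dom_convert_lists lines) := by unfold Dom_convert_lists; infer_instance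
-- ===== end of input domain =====

-- B replaces A's in_list flag state machine by a run-based pass over maximal '- ' runs; same O(n) cost, different decomposition.


-- shared tiny expressions both Pythons use verbatim: line.startswith('- ') and f'<li>{line[2:]}</li>'
def pvItem (l : String) : Bool := PySem.Str.startswith l "- "
def pvLi (l : String) : String := "<li>" ++ PySem.Str.slice l (some 2) none ++ "</li>"

-- ===== PORT A =====
-- literal port: fold over lines carrying (in_list, html_lines), then the trailing close
def pvStepA (st : Bool × List String) (line : String) : Bool × List String :=
  let (in_list, html_lines) := st
  if pvItem line then
    let html_lines := if ¬ in_list then html_lines ++ ["<ul>"] else html_lines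
    (true, html_lines ++ [pvLi line])
  else
    let html_lines := if in_list then html_lines ++ ["</ul>"] else html_lines
    (false, html_lines ++ [line])

def convert_lists (lines : List String) : List String :=
  let st := lines.foldl pvStepA (false, [])
  if st.1 then st.2 ++ ["</ul>"] else st.2

-- ===== PORT B =====
-- run-based: a maximal run of '- ' lines becomes <ul>, its items, </ul>; other lines pass through
def convert_lists_alt : List String → List String
  | [] => []
  | l :: ls =>
    if pvItem l then
      "<ul>" :: pvLi l :: ((ls.takeWhile pvItem).map pvLi ++ "</ul>" :: convert_lists_alt (ls.dropWhile pvItem))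
    else
      l :: convert_lists_alt ls
  termination_by ls => ls.length
  decreasing_by
    · exact Nat.lt_succ_of_le (List.length_dropWhile_le pvItem ls)
    · simp

-- ===== PRECONDITION & SPEC =====
def Spec_convert_lists (lines : List String) (out : List String) : Prop := out = convert_lists_alt lines
instance (lines : List String) (out : List String) : Decidable (Spec_convert_lists lines out) := by unfold Spec_convert_lists; infer_instance

-- ===== CLAIM (what is proved, stated in full; the proofs are below) =====
def Claim_equal_convert_lists : Prop := ∀ (lines : List String), Dom_convert_lists lines → Spec_convert_lists lines (convert_lists lines)

-- ===== LEMMAS AND PROOFS =====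

-- A's loop in continuation form: what A appends from state in_list onward
def pvGoA (in_list : Bool) : List String → List String
  | [] => if in_list then ["</ul>"] else []
  | l :: ls =>
    if pvItem l then
      (if ¬ in_list then ["<ul>"] else []) ++ pvLi l :: pvGoA true ls
    else
      (if in_list then ["</ul>"] else []) ++ l :: pvGoA false ls

theorem pvFoldA (ls : List String) : ∀ (in_list : Bool) (acc : List String),
    (let st := ls.foldl pvStepA (in_list, acc)
     if st.1 then st.2 ++ ["</ul>"] else st.2) = acc ++ pvGoA in_list ls := by
  induction ls with
  | nil => intro inl acc; cases inl <;> simp [pvGoA]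
  | cons l ls ih =>
    intro inl acc
    simp only [List.foldl_cons, pvGoA]
    by_cases h : pvItem l = true <;> cases inl <;>
      simp [pvStepA, h, ih true, ih false]

theorem pvGoA_alt (ls : List String) :
    pvGoA false ls = convert_lists_alt ls ∧
    pvGoA true ls = (ls.takeWhile pvItem).map pvLi ++ "</ul>" :: convert_lists_alt (ls.dropWhile pvItem) := by
  induction ls with
  | nil => simp [pvGoA, convert_lists_alt]
  | cons l ls ih =>
    by_cases h : pvItem l = true
    · simp [pvGoA, convert_lists_alt, h, ih.2]
    · simp [pvGoA, convert_lists_alt, h, ih.1]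

-- ===== VERDICT (by name: the statement is the Claim_ definition above) =====
theorem convert_lists_spec : Claim_equal_convert_lists := by
  intro lines _
  show convert_lists lines = convert_lists_alt lines
  rw [convert_lists, pvFoldA lines false []]
  simpa using (pvGoA_alt lines).1
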